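-- pv_equiv track=rewrite | github.com/imehtn/TIP_102 | Unit2/sess1/v2_standardproblems.py | find_common_signals1
-- ===== SOURCE A (Python) =====
-- def find_common_signals1(signals1, signals2):
--     #declare empty list
--     lst = []
--     #sort 1 and 2
--     signals1.sort()
--     signals2.sort()
--     from collections import Counter
--     #make into dicts by using counter function
--     sig1 = Counter(signals1)
--     sig2 = Counter(signals2)
--
--     #go through each elem in 1 and see if it is in 2
--     count1 = 0
--     for key, count in sig1.items():
--         #if it is, append count to empty list
--         if key in sig2:
--             count1 += count
--     lst.append(count1)
--
--     count2 = 0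
--     for key, count in sig2.items():
--     #go through each elem in 2  and see if it is in 1
--         #if it is, append count to lists
--         if key in sig1:
--             count2 += count
--     lst.append(count2)
--
--     return lst
-- ===== SOURCE B (Python) =====
-- def find_common_signals1(signals1, signals2):
--     # keep A's in-place sorts (observable mutation of the arguments)
--     signals1.sort()
--     signals2.sort()
--     count1 = count2 = 0
--     i = j = 0
--     n, m = len(signals1), len(signals2)
--     while i < n and j < m:
--         if signals1[i] < signals2[j]:
--             i += 1
--         elif signals2[j] < signals1[i]:
--             j += 1
--         else:
--             v = signals1[i]
--             while i < n and signals1[i] == v: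
--                 i += 1
--                 count1 += 1
--             while j < m and signals2[j] == v:
--                 j += 1
--                 count2 += 1
--     return [count1, count2]
-- ===== Notes on version B (the rewrite author's own statement) =====
-- stated objective: alternative
-- what changed: B replaces A's two Counter dicts and per-key summation by a single two-pointer merge over the sorted lists, counting the run lengths of each shared value in each list (sorts kept for the in-place mutation side effect).
import Mathlib
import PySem

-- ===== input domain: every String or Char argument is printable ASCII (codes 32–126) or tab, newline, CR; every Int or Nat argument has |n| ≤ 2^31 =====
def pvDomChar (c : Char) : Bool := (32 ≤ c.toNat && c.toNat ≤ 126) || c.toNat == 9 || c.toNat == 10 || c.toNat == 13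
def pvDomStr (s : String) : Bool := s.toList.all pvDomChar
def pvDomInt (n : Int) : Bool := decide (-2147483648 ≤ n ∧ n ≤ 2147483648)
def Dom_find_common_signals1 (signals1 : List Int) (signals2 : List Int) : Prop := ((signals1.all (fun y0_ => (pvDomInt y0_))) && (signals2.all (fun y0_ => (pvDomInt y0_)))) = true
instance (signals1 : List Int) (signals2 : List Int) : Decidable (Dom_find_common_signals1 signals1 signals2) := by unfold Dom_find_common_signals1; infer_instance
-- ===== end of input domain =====

-- B replaces A's two Counter dicts with a single two-pointer merge over the sorted lists
-- (same O(n log n) cost, a different algorithm); both keep the in-place sorts — equivalence proved on return values.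


-- ===== PORT A =====
def find_common_signals1 (signals1 : List Int) (signals2 : List Int) : List Int :=
  let s1 := PySem.List.sorted signals1 (fun x => x) false
  let s2 := PySem.List.sorted signals2 (fun x => x) false
  let sig1 := PySem.Dict.counter s1
  let sig2 := PySem.Dict.counter s2
  let count1 := sig1.items.foldl (fun acc kv => if sig2.contains kv.1 then acc + kv.2 else acc) (0 : Int)
  let count2 := sig2.items.foldl (fun acc kv => if sig1.contains kv.1 then acc + kv.2 else acc) (0 : Int)
  [count1, count2]

-- ===== PORT B =====
-- the outer 'while i < n and j < m' loop of Source B; the two inner run-counting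
-- whiles are the takeWhile length / dropWhile advance over the current suffixes
def pvTwoPtr : List Int → List Int → Int × Int
  | [], _ => (0, 0)
  | _ :: _, [] => (0, 0)
  | a :: xs, b :: ys =>
    if a < b then pvTwoPtr xs (b :: ys)
    else if b < a then pvTwoPtr (a :: xs) ys
    else
      let r := pvTwoPtr ((a :: xs).dropWhile (fun x => x == a)) ((b :: ys).dropWhile (fun y => y == a))
      ((((a :: xs).takeWhile (fun x => x == a)).length : Int) + r.1,
       (((b :: ys).takeWhile (fun y => y == a)).length : Int) + r.2)
termination_by l1 l2 => l1.length + l2.length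
decreasing_by
  all_goals
    first
    | (simp; omega)
    | (have h1 : ((a :: xs).dropWhile (fun x => x == a)).length ≤ xs.length := by
         rw [List.dropWhile_cons_of_pos (by simp)]
         exact List.length_dropWhile_le _ _
       have h2 : ((b :: ys).dropWhile (fun y => y == a)).length ≤ (b :: ys).length :=
         List.length_dropWhile_le _ _
       simp only [List.length_cons] at h1 h2 ⊢
       omega)

def find_common_signals1_alt (signals1 : List Int) (signals2 : List Int) : List Int :=
  let s1 := PySem.List.sorted signals1 (fun x => x) false
  let s2 := PySem.List.sorted signals2 (fun x => x) false
  let r := pvTwoPtr s1 s2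
  [r.1, r.2]

-- ===== PRECONDITION & SPEC =====
def Spec_find_common_signals1 (signals1 : List Int) (signals2 : List Int) (out : List Int) : Prop := out = find_common_signals1_alt signals1 signals2
instance (signals1 : List Int) (signals2 : List Int) (out : List Int) : Decidable (Spec_find_common_signals1 signals1 signals2 out) := by unfold Spec_find_common_signals1; infer_instance

-- ===== CLAIM (what is proved, stated in full; the proofs are below) =====
def Claim_equal_find_common_signals1 : Prop := ∀ (signals1 : List Int) (signals2 : List Int), Dom_find_common_signals1 signals1 signals2 → Spec_find_common_signals1 signals1 signals2 (find_common_signals1 signals1 signals2)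

-- ===== LEMMAS AND PROOFS =====

-- sum over a nodup list of the indicator of one value
lemma sum_indicator_nodup (v : List Int) (hv : v.Nodup) (x : Int) :
    (v.map (fun k => if k = x then (1 : Int) else 0)).sum = if x ∈ v then (1 : Int) else 0 := by
  induction v with
  | nil => simp
  | cons a t ih =>
    rcases List.nodup_cons.mp hv with ⟨ha, ht⟩
    by_cases hax : a = x
    · subst hax
      simp [ha, List.sum_cons, ih ht]
    · simp only [List.map_cons, List.sum_cons, if_neg hax, ih ht, List.mem_cons]
      rcases (by tauto : x ∈ t ∨ ¬ (x = a ∨ x ∈ t)) with h | h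
      · simp [h, Ne.symm hax]
      · simp [h]
        intro hx; exact absurd (Or.inr hx) h

-- sum of counts over a nodup superset of l's values, restricted by p, is l's countP p
lemma sum_count_filter (u : List Int) (hu : u.Nodup) (p : Int → Bool) (l : List Int)
    (hsub : ∀ k ∈ l, k ∈ u) :
    ((u.filter p).map (fun k => (l.count k : Int))).sum = (l.countP p : Int) := by
  induction l with
  | nil => simp
  | cons x t ih =>
    have hx : x ∈ u := hsub x (List.mem_cons_self)
    have hsub' : ∀ k ∈ t, k ∈ u := fun k hk => hsub k (List.mem_cons_of_mem _ hk)
    have hcong : (u.filter p).map (fun k => ((x :: t).count k : Int))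
        = (u.filter p).map (fun k => (t.count k : Int) + if k = x then 1 else 0) := by
      apply List.map_congr_left
      intro k _
      by_cases hkx : k = x
      · simp [hkx]
      · simp [hkx, Ne.symm hkx]
    rw [hcong, PySem.List.sum_map_add_int, ih hsub',
        sum_indicator_nodup (u.filter p) (hu.filter p) x, List.countP_cons]
    by_cases hpx : p x = true
    · simp [List.mem_filter, hx, hpx]
    · simp [List.mem_filter, hpx]

-- A's side: the counter-items fold equals a membership count over the list
lemma side_eq (a b : List Int) :
    (PySem.Dict.counter a).items.foldl
        (fun acc kv => if (PySem.Dict.counter b).contains kv.1 then acc + kv.2 else acc) (0 : Int)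
      = (a.countP (fun x => decide (x ∈ b)) : Int) := by
  rw [PySem.Dict.items_counter, List.foldl_map]
  simp only [PySem.Dict.contains_counter]
  rw [PySem.List.foldl_if_eq_foldl_filter (p := fun k => b.contains k)
        (f := fun acc k => acc + (a.count k : Int)),
      PySem.List.foldl_add (g := fun k => (a.count k : Int))]
  rw [sum_count_filter (PySem.Set.ofList a) (PySem.Set.nodup_ofList a) _ a
        (fun k hk => (PySem.Set.mem_ofList a k).mpr hk), zero_add]
  congr 1
  apply List.countP_congr
  intro x _
  simp

-- elements of the suffix after dropping the leading run of a's are all > a (in a sorted list)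
lemma gt_of_mem_dropWhile (a : Int) (l : List Int) (hl : l.Pairwise (· ≤ ·))
    (hge : ∀ x ∈ l, a ≤ x) : ∀ x ∈ l.dropWhile (fun x => x == a), a < x := by
  induction l with
  | nil => simp
  | cons c t ih =>
    by_cases hc : c = a
    · subst hc
      rw [List.dropWhile_cons_of_pos (by simp)]
      exact ih (List.pairwise_cons.mp hl).2 (fun x hx => hge x (List.mem_cons_of_mem _ hx))
    · rw [List.dropWhile_cons_of_neg (by simp [hc])]
      intro x hx
      have hca : a < c := lt_of_le_of_ne (hge c List.mem_cons_self) (fun h => hc h.symm)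
      rcases List.mem_cons.mp hx with rfl | hx'
      · exact hca
      · exact lt_of_lt_of_le hca ((List.pairwise_cons.mp hl).1 x hx')

-- B's two-pointer merge computes the two membership counts, on sorted inputs
lemma pvTwoPtr_eq (xs ys : List Int) (hx : xs.Pairwise (· ≤ ·)) (hy : ys.Pairwise (· ≤ ·)) :
    pvTwoPtr xs ys = ((xs.countP (fun x => decide (x ∈ ys)) : Int),
                      (ys.countP (fun y => decide (y ∈ xs)) : Int)) := by
  induction xs, ys using pvTwoPtr.induct with
  | case1 ys => simp [pvTwoPtr]
  | case2 a xs => simp [pvTwoPtr]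
  | case3 a xs b ys hab ih =>
    have hx' := (List.pairwise_cons.mp hx).2
    have hyall : ∀ y ∈ b :: ys, b ≤ y := by
      intro y hyy
      rcases List.mem_cons.mp hyy with rfl | h
      · exact le_refl _
      · exact (List.pairwise_cons.mp hy).1 y h
    have hnotmem : a ∉ b :: ys := fun hmem => absurd (hyall a hmem) (not_le.mpr hab)
    have h1 : List.countP (fun x => decide (x ∈ b :: ys)) (a :: xs)
        = List.countP (fun x => decide (x ∈ b :: ys)) xs := by
      rw [List.countP_cons]
      simp [hnotmem]
    have h2 : List.countP (fun y => decide (y ∈ a :: xs)) (b :: ys)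
        = List.countP (fun y => decide (y ∈ xs)) (b :: ys) := by
      apply List.countP_congr
      intro y hyy
      have hay : a < y := lt_of_lt_of_le hab (hyall y hyy)
      simp [List.mem_cons, hay.ne']
    simp only [pvTwoPtr]
    rw [if_pos hab, ih hx' hy, h1, h2]
  | case4 a xs b ys hab hba ih =>
    have hy' := (List.pairwise_cons.mp hy).2
    have hxall : ∀ x ∈ a :: xs, a ≤ x := by
      intro x hxx
      rcases List.mem_cons.mp hxx with rfl | h
      · exact le_refl _
      · exact (List.pairwise_cons.mp hx).1 x h
    have hnotmem : b ∉ a :: xs := fun hmem => absurd (hxall b hmem) (not_le.mpr hba)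
    have h1 : List.countP (fun y => decide (y ∈ a :: xs)) (b :: ys)
        = List.countP (fun y => decide (y ∈ a :: xs)) ys := by
      rw [List.countP_cons]
      simp [hnotmem]
    have h2 : List.countP (fun x => decide (x ∈ b :: ys)) (a :: xs)
        = List.countP (fun x => decide (x ∈ ys)) (a :: xs) := by
      apply List.countP_congr
      intro x hxx
      have hbx : b < x := lt_of_lt_of_le hba (hxall x hxx)
      simp [List.mem_cons, hbx.ne']
    simp only [pvTwoPtr]
    rw [if_neg hab, if_pos hba, ih hx hy', h1, h2]
  | case5 a xs b ys hab hba ih =>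
    have heq : a = b := le_antisymm (not_lt.mp hba) (not_lt.mp hab)
    subst heq
    have hxge : ∀ x ∈ a :: xs, a ≤ x := by
      intro x hxx
      rcases List.mem_cons.mp hxx with rfl | h
      · exact le_refl _
      · exact (List.pairwise_cons.mp hx).1 x h
    have hyge : ∀ y ∈ a :: ys, a ≤ y := by
      intro y hyy
      rcases List.mem_cons.mp hyy with rfl | h
      · exact le_refl _
      · exact (List.pairwise_cons.mp hy).1 y h
    have hd1gt := gt_of_mem_dropWhile a (a :: xs) hx hxge
    have hd2gt := gt_of_mem_dropWhile a (a :: ys) hy hyge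
    have hd1p : ((a :: xs).dropWhile (fun x => x == a)).Pairwise (· ≤ ·) :=
      hx.sublist (List.dropWhile_sublist _)
    have hd2p : ((a :: ys).dropWhile (fun y => y == a)).Pairwise (· ≤ ·) :=
      hy.sublist (List.dropWhile_sublist _)
    have hmem2 : ∀ x : Int, a < x →
        ((x ∈ a :: ys) ↔ x ∈ (a :: ys).dropWhile (fun y => y == a)) := by
      intro x hax
      conv_lhs => rw [← List.takeWhile_append_dropWhile (p := fun y => y == a) (l := a :: ys)]
      rw [List.mem_append]
      constructor
      · rintro (h | h)
        · have := List.mem_takeWhile_imp h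
          simp at this
          omega
        · exact h
      · exact Or.inr
    have hmem1 : ∀ y : Int, a < y →
        ((y ∈ a :: xs) ↔ y ∈ (a :: xs).dropWhile (fun x => x == a)) := by
      intro y hay
      conv_lhs => rw [← List.takeWhile_append_dropWhile (p := fun x => x == a) (l := a :: xs)]
      rw [List.mem_append]
      constructor
      · rintro (h | h)
        · have := List.mem_takeWhile_imp h
          simp at this
          omega
        · exact h
      · exact Or.inr
    have hc1 : List.countP (fun x => decide (x ∈ a :: ys)) (a :: xs)
        = ((a :: xs).takeWhile (fun x => x == a)).length
          + List.countP (fun x => decide (x ∈ (a :: ys).dropWhile (fun y => y == a)))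
              ((a :: xs).dropWhile (fun x => x == a)) := by
      conv_lhs => rw [← List.takeWhile_append_dropWhile (p := fun x => x == a) (l := a :: xs)]
      rw [List.countP_append]
      congr 1
      · apply List.countP_eq_length.mpr
        intro x hxx
        have := List.mem_takeWhile_imp hxx
        simp at this
        simp [this]
      · apply List.countP_congr
        intro x hxx
        simp [hmem2 x (hd1gt x hxx)]
    have hc2 : List.countP (fun y => decide (y ∈ a :: xs)) (a :: ys)
        = ((a :: ys).takeWhile (fun y => y == a)).length
          + List.countP (fun y => decide (y ∈ (a :: xs).dropWhile (fun x => x == a)))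
              ((a :: ys).dropWhile (fun y => y == a)) := by
      conv_lhs => rw [← List.takeWhile_append_dropWhile (p := fun y => y == a) (l := a :: ys)]
      rw [List.countP_append]
      congr 1
      · apply List.countP_eq_length.mpr
        intro y hyy
        have := List.mem_takeWhile_imp hyy
        simp at this
        simp [this]
      · apply List.countP_congr
        intro y hyy
        simp [hmem1 y (hd2gt y hyy)]
    simp only [pvTwoPtr, if_neg (lt_irrefl a)]
    rw [ih hd1p hd2p, hc1, hc2, Prod.mk.injEq]
    constructor <;> push_cast <;> ring

-- ===== VERDICT (by name: the statement is the Claim_ definition above) =====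
theorem find_common_signals1_spec : Claim_equal_find_common_signals1 := by
  intro signals1 signals2 _
  show _ = _
  simp only [find_common_signals1, find_common_signals1_alt]
  rw [side_eq, side_eq,
      pvTwoPtr_eq _ _ (PySem.List.sorted_pairwise _ _) (PySem.List.sorted_pairwise _ _)]
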